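-- pv_equiv track=rewrite | github.com/HenriqueFBadin/ReconhecedorDeAlvo | ferramentas/portscanner.py | group_open_ports
-- ===== SOURCE A (Python) =====
-- def group_open_ports(open_ports):
--     grouped = []
--     current_service = None
--     start = None
--     prev = None
--
--     for port in sorted(open_ports):
--         service = open_ports[port]
--
--         if current_service is None:
--             current_service = service
--             start = port
--         elif service != current_service or port != prev + 1:
--             grouped.append(
--                 f"{start}-{prev} open {current_service}"
--                 if start != prev
--                 else f"{start} open {current_service}"
--             )
--             current_service = service
--             start = port
--
--         prev = port
--
--     if start is not None:
--         grouped.append(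
--             f"{start}-{prev} open {current_service}"
--             if start != prev
--             else f"{start} open {current_service}"
--         )
--
--     return grouped
-- ===== SOURCE B (Python) =====
-- def group_open_ports(open_ports):
--     ports = sorted(open_ports)
--     starts = [p for p in ports
--               if p - 1 not in open_ports or open_ports[p - 1] != open_ports[p]]
--     ends = [p for p in ports
--             if p + 1 not in open_ports or open_ports[p + 1] != open_ports[p]]
--     return [f"{s}-{e} open {open_ports[s]}" if s != e
--             else f"{s} open {open_ports[s]}"
--             for s, e in zip(starts, ends)]
-- ===== Notes on version B (the rewrite author's own statement) =====
-- stated objective: alternative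
-- what changed: Replaces A's sequential state machine (current_service/start/prev with a trailing flush) by stateless boundary detection: a run start is a port whose predecessor port is absent or has a different service, a run end is one whose successor is absent or differs, so two independent dict-lookup filters over the sorted ports are zipped into (start,end) pairs and formatted — no running state and no flush exist.
import Mathlib
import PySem

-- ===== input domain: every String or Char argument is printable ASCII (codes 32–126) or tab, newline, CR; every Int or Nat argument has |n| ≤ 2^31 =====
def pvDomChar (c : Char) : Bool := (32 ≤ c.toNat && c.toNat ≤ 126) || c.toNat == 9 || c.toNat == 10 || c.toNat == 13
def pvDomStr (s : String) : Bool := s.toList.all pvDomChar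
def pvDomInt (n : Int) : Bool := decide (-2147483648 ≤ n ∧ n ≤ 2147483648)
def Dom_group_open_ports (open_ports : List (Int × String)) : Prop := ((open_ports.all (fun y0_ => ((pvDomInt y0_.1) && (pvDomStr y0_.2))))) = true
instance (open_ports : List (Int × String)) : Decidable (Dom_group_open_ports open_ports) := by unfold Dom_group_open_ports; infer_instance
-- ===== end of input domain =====

-- B replaces A's sequential state machine by stateless boundary detection: run starts and run
-- ends are computed by two independent dict-lookup filters and zipped (same cost, no running state).

-- ===== PORT A =====
-- 'sorted(open_ports)' iterates the dict's (unique) keys: dedup of the assoc list's keys, sorted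
def pvFmtA (start prev : Int) (svc : String) : String :=
  if start ≠ prev then PySem.Int.toStr start ++ "-" ++ PySem.Int.toStr prev ++ " open " ++ svc
  else PySem.Int.toStr start ++ " open " ++ svc

-- one iteration of A's for-loop; state = (grouped, current_service, start, prev); '.getD' defaults are
-- never reached: Python's None-checks guarantee prev/start are set whenever they are read
def pvStepA (open_ports : List (Int × String))
    (st : List String × Option String × Option Int × Option Int) (port : Int) :
    List String × Option String × Option Int × Option Int :=
  let grouped := st.1
  let current_service := st.2.1
  let start := st.2.2.1
  let prev := st.2.2.2
  let service := (PySem.Dict.get? (PySem.Dict.mk open_ports) port).getD ""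
  match current_service with
  | none => (grouped, some service, some port, some port)
  | some cs =>
    if service ≠ cs ∨ port ≠ prev.getD 0 + 1 then
      (grouped ++ [pvFmtA (start.getD 0) (prev.getD 0) cs], some service, some port, some port)
    else
      (grouped, some cs, start, some port)

-- the trailing 'if start is not None: grouped.append(...)'
def pvFinishA (st : List String × Option String × Option Int × Option Int) : List String :=
  match st with
  | (grouped, cs, some s, some p) => grouped ++ [pvFmtA s p (cs.getD "")]
  | (grouped, _, _, _) => grouped

def group_open_ports (open_ports : List (Int × String)) : List String :=
  pvFinishA ((PySem.List.sorted (PySem.List.dedup (open_ports.map Prod.fst)) (fun x => x) false).foldl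
    (pvStepA open_ports) ([], none, none, none))

-- ===== PORT B =====
def pvSvcB (open_ports : List (Int × String)) (p : Int) : String :=
  ((PySem.Dict.mk open_ports).get? p).getD ""

-- 'p - 1 not in open_ports or open_ports[p - 1] != open_ports[p]'
def pvIsStartB (open_ports : List (Int × String)) (p : Int) : Bool :=
  match (PySem.Dict.mk open_ports).get? (p - 1) with
  | none => true
  | some s => s != pvSvcB open_ports p

-- 'p + 1 not in open_ports or open_ports[p + 1] != open_ports[p]'
def pvIsEndB (open_ports : List (Int × String)) (p : Int) : Bool :=
  match (PySem.Dict.mk open_ports).get? (p + 1) with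
  | none => true
  | some s => s != pvSvcB open_ports p

def pvFmtB (open_ports : List (Int × String)) (se : Int × Int) : String :=
  if se.1 ≠ se.2
  then PySem.Int.toStr se.1 ++ "-" ++ PySem.Int.toStr se.2 ++ " open " ++ pvSvcB open_ports se.1
  else PySem.Int.toStr se.1 ++ " open " ++ pvSvcB open_ports se.1

def group_open_ports_alt (open_ports : List (Int × String)) : List String :=
  let ports := PySem.List.sorted (PySem.List.dedup (open_ports.map Prod.fst)) (fun x => x) false
  ((ports.filter (pvIsStartB open_ports)).zip (ports.filter (pvIsEndB open_ports))).map
    (pvFmtB open_ports)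

-- ===== PRECONDITION & SPEC =====
def Spec_group_open_ports (open_ports : List (Int × String)) (out : List String) : Prop := out = group_open_ports_alt open_ports
instance (open_ports : List (Int × String)) (out : List String) : Decidable (Spec_group_open_ports open_ports out) := by unfold Spec_group_open_ports; infer_instance

-- ===== CLAIM (what is proved, stated in full; the proofs are below) =====
def Claim_equal_group_open_ports : Prop := ∀ (open_ports : List (Int × String)), Dom_group_open_ports open_ports → Spec_group_open_ports open_ports (group_open_ports open_ports)

-- ===== LEMMAS AND PROOFS =====

-- proof-side characterization of A: split the sorted key list into maximal same-service consecutive runs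
def pvExtendB (open_ports : List (Int × String)) (endP : Int) : List Int → Int × List Int
  | [] => (endP, [])
  | q :: qs =>
    if q = endP + 1 ∧ pvSvcB open_ports q = pvSvcB open_ports endP then pvExtendB open_ports q qs
    else (endP, q :: qs)

theorem pvExtendB_len (open_ports : List (Int × String)) (endP : Int) (l : List Int) :
    (pvExtendB open_ports endP l).2.length ≤ l.length := by
  induction l generalizing endP with
  | nil => simp [pvExtendB]
  | cons q qs ih =>
    simp only [pvExtendB]
    split
    · exact le_trans (ih q) (Nat.le_succ _)
    · simp

def pvChunksB (open_ports : List (Int × String)) : List Int → List String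
  | [] => []
  | start :: rest =>
    let r := pvExtendB open_ports start rest
    (if start ≠ r.1 then
        PySem.Int.toStr start ++ "-" ++ PySem.Int.toStr r.1 ++ " open " ++ pvSvcB open_ports start
      else PySem.Int.toStr start ++ " open " ++ pvSvcB open_ports start) :: pvChunksB open_ports r.2
termination_by l => l.length
decreasing_by
  simpa using Nat.lt_succ_of_le (pvExtendB_len open_ports start rest)

-- the looked-up service of A's loop body, folded back into pvSvcB
theorem pvSvc_fold (o : List (Int × String)) (q : Int) :
    ((PySem.Dict.mk o).get? q).getD "" = pvSvcB o q := rfl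

-- B's head emission equals A's formatter applied at the run start
theorem pvChunksB_cons (o : List (Int × String)) (q : Int) (l : List Int) :
    pvChunksB o (q :: l) =
      pvFmtA q (pvExtendB o q l).1 (pvSvcB o q) :: pvChunksB o (pvExtendB o q l).2 := by
  simp [pvChunksB, pvFmtA]

-- main invariant for A: in the middle of a run started at s (service pvSvcB o s, last consumed
-- port p), finishing A's fold yields the emitted groups of the run-splitting characterization
theorem pvRun (o : List (Int × String)) (l : List Int) :
    ∀ (g : List String) (s p : Int), pvSvcB o p = pvSvcB o s →
      pvFinishA (l.foldl (pvStepA o) (g, some (pvSvcB o s), some s, some p)) =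
        g ++ pvFmtA s (pvExtendB o p l).1 (pvSvcB o s) :: pvChunksB o (pvExtendB o p l).2 := by
  induction l with
  | nil =>
    intro g s p h
    simp [pvFinishA, pvExtendB, pvChunksB]
  | cons q l ih =>
    intro g s p h
    simp only [List.foldl_cons, pvStepA, pvSvc_fold]
    by_cases hb : pvSvcB o q ≠ pvSvcB o s ∨ q ≠ p + 1
    · rw [if_pos (by simpa [pvSvcB] using hb)]
      have := ih (g ++ [pvFmtA s p (pvSvcB o s)]) q q rfl
      simp only [Option.getD_some]
      rw [this]
      have hext : pvExtendB o p (q :: l) = (p, q :: l) := by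
        simp only [pvExtendB]
        rw [if_neg]
        rintro ⟨h1, h2⟩
        rw [h2, h] at hb
        simp [h1] at hb
      rw [hext, pvChunksB_cons]
      simp
    · rw [if_neg (by simpa [pvSvcB] using hb)]
      rw [not_or, not_not, not_not] at hb
      obtain ⟨h1, h2⟩ := hb
      have := ih g s q (by rw [h1])
      rw [this]
      have hext : pvExtendB o p (q :: l) = pvExtendB o q l := by
        simp only [pvExtendB]
        rw [if_pos ⟨h2, by rw [h1, h]⟩]
      rw [hext]

-- A's fold+flush equals the run-splitting characterization, for ANY key list
theorem pvA_chunks (o : List (Int × String)) (l : List Int) :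
    pvFinishA (l.foldl (pvStepA o) ([], none, none, none)) = pvChunksB o l := by
  cases l with
  | nil => simp [pvFinishA, pvChunksB]
  | cons q t =>
    simp only [List.foldl_cons, pvStepA, pvSvc_fold]
    rw [pvRun o t [] q q rfl, pvChunksB_cons]
    simp

-- a present key's lookup returns exactly its service string
theorem pvGetSvc (o : List (Int × String)) (x : Int)
    (h : ((PySem.Dict.mk o).get? x).isSome = true) :
    (PySem.Dict.mk o).get? x = some (pvSvcB o x) := by
  cases hx : (PySem.Dict.mk o).get? x with
  | none => rw [hx] at h; simp at h
  | some s => simp [pvSvcB, hx]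

-- full specification of one pvExtendB run (the conjunction carries the whole induction)
theorem pvExtend_spec (o : List (Int × String)) :
    ∀ (rest : List Int) (e : Int),
    List.Pairwise (· < ·) (e :: rest) →
    (∀ x ∈ e :: rest, ((PySem.Dict.mk o).get? x).isSome = true) →
    e ≤ (pvExtendB o e rest).1 ∧
    pvSvcB o (pvExtendB o e rest).1 = pvSvcB o e ∧
    List.Pairwise (· < ·) ((pvExtendB o e rest).1 :: (pvExtendB o e rest).2) ∧
    rest.filter (pvIsStartB o) = (pvExtendB o e rest).2.filter (pvIsStartB o) ∧
    (e :: rest).filter (pvIsEndB o) =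
      ((pvExtendB o e rest).1 :: (pvExtendB o e rest).2).filter (pvIsEndB o) ∧
    (∀ x ∈ rest, x ∈ (pvExtendB o e rest).2 ∨ x ≤ (pvExtendB o e rest).1) ∧
    (∀ q qs, (pvExtendB o e rest).2 = q :: qs →
        ¬(q = (pvExtendB o e rest).1 + 1 ∧ pvSvcB o q = pvSvcB o (pvExtendB o e rest).1)) ∧
    (pvExtendB o e rest).1 ∈ e :: rest ∧
    (∀ x ∈ (pvExtendB o e rest).2, x ∈ rest) := by
  intro rest
  induction rest with
  | nil =>
    intro e _ _
    refine ⟨le_refl _, rfl, ?_, rfl, rfl, ?_, ?_, ?_, ?_⟩ <;> simp [pvExtendB]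
  | cons q qs ih =>
    intro e hpw hK
    by_cases hc : q = e + 1 ∧ pvSvcB o q = pvSvcB o e
    · have hext : pvExtendB o e (q :: qs) = pvExtendB o q qs := by
        simp only [pvExtendB]; rw [if_pos hc]
      have hpw' : List.Pairwise (· < ·) (q :: qs) := hpw.tail
      have hK' : ∀ x ∈ q :: qs, ((PySem.Dict.mk o).get? x).isSome = true :=
        fun x hx => hK x (List.mem_cons_of_mem _ hx)
      obtain ⟨i1, i2, i3, i4, i5, i6, i7, i8, i9⟩ := ih q hpw' hK'
      have heq : e < q := (List.pairwise_cons.mp hpw).1 q (List.mem_cons_self)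
      have hKe : ((PySem.Dict.mk o).get? e).isSome = true := hK e List.mem_cons_self
      have hKq : ((PySem.Dict.mk o).get? q).isSome = true := hK q (List.mem_cons_of_mem _ List.mem_cons_self)
      -- q is not a run start: q-1 = e present with the same service
      have hnsq : pvIsStartB o q = false := by
        have : q - 1 = e := by omega
        simp only [pvIsStartB, this, pvGetSvc o e hKe]
        simp [hc.2]
      -- e is not a run end: e+1 = q present with the same service
      have hnee : pvIsEndB o e = false := by
        have : e + 1 = q := by omega
        simp only [pvIsEndB, this, pvGetSvc o q hKq]
        simp [hc.2]
      rw [hext]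
      refine ⟨le_of_lt (lt_of_lt_of_le heq i1), by rw [i2, hc.2], i3, ?_, ?_, ?_, i7, ?_, ?_⟩
      · rw [List.filter_cons_of_neg (by simp [hnsq]), i4]
      · rw [List.filter_cons_of_neg (by simp [hnee]), i5]
      · intro x hx
        rcases List.mem_cons.mp hx with hx | hx
        · exact Or.inr (hx ▸ i1)
        · exact i6 x hx
      · exact List.mem_cons_of_mem _ i8
      · exact fun x hx => List.mem_cons_of_mem _ (i9 x hx)
    · have hext : pvExtendB o e (q :: qs) = (e, q :: qs) := by
        simp only [pvExtendB]; rw [if_neg hc]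
      rw [hext]
      refine ⟨le_refl _, rfl, hpw, rfl, rfl, ?_, ?_, List.mem_cons_self, fun x hx => hx⟩
      · exact fun x hx => Or.inl hx
      · intro q' qs' hqq
        have h1 : q' = q := by
          have := congrArg (fun l => l.head?) hqq
          simpa using this.symm
        exact h1 ▸ hc

-- run-splitting equals B's zip of boundary filters, on a strictly increasing key list that is
-- upward-closed in the dict's key set and whose head is a run start
theorem pvChunks_zip (o : List (Int × String)) :
    ∀ (n : Nat) (l : List Int), l.length ≤ n →
    List.Pairwise (· < ·) l →
    (∀ x ∈ l, ((PySem.Dict.mk o).get? x).isSome = true) →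
    (∀ y, ((PySem.Dict.mk o).get? y).isSome = true → (∃ x ∈ l, x < y) → y ∈ l) →
    (∀ q, l.head? = some q → pvIsStartB o q = true) →
    pvChunksB o l =
      ((l.filter (pvIsStartB o)).zip (l.filter (pvIsEndB o))).map (pvFmtB o) := by
  intro n
  induction n with
  | zero =>
    intro l hlen _ _ _ _
    have : l = [] := List.eq_nil_of_length_eq_zero (Nat.le_zero.mp hlen)
    subst this
    simp [pvChunksB]
  | succ n ih =>
    intro l hlen hpw hK hcl hhd
    cases l with
    | nil => simp [pvChunksB]
    | cons e rest =>
      obtain ⟨i1, i2, i3, i4, i5, i6, i7, i8, i9⟩ := pvExtend_spec o rest e hpw hK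
      set f := (pvExtendB o e rest).1 with hf
      set rest' := (pvExtendB o e rest).2 with hrest'
      have hKf : ((PySem.Dict.mk o).get? f).isSome = true := hK f i8
      -- membership of y > f transfers into rest'
      have hmem' : ∀ y, ((PySem.Dict.mk o).get? y).isSome = true → f < y → y ∈ rest' := by
        intro y hKy hfy
        have hyl : y ∈ e :: rest := hcl y hKy ⟨e, List.mem_cons_self, lt_of_le_of_lt i1 hfy⟩
        rcases List.mem_cons.mp hyl with h | h
        · omega
        · rcases i6 y h with h' | h'
          · exact h'
          · omega
      -- f is a run end
      have hef : pvIsEndB o f = true := by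
        cases hKf1 : (PySem.Dict.mk o).get? (f + 1) with
        | none => simp [pvIsEndB, hKf1]
        | some s =>
          have hKs : ((PySem.Dict.mk o).get? (f + 1)).isSome = true := by simp [hKf1]
          have hin : f + 1 ∈ rest' := hmem' (f + 1) hKs (by omega)
          cases hr : rest' with
          | nil => rw [hr] at hin; simp at hin
          | cons q' qs' =>
            rw [hr] at hin
            have hq'f : f < q' := (List.pairwise_cons.mp i3).1 q' (by rw [hr]; exact List.mem_cons_self)
            have hq : q' = f + 1 := by
              rcases List.mem_cons.mp hin with h | h
              · omega
              · exfalso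
                have := (List.pairwise_cons.mp (by rw [hr] at i3; exact i3.tail)).1 _ h
                omega
            have hns := i7 q' qs' hr
            have hsvc : pvSvcB o (f + 1) ≠ pvSvcB o f := by
              intro hcon
              exact hns ⟨hq, by rw [hq]; exact hcon⟩
            have hsval : s = pvSvcB o (f + 1) := by
              have := pvGetSvc o (f + 1) hKs
              rw [hKf1] at this
              exact (Option.some.inj this)
            have hsq : s ≠ pvSvcB o f := by rw [hsval]; exact hsvc
            simp only [pvIsEndB, hKf1]
            simpa using hsq
      -- the head of rest' (if any) is a run start
      have hhd' : ∀ q, rest'.head? = some q → pvIsStartB o q = true := by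
        intro q hq
        cases hr : rest' with
        | nil => rw [hr] at hq; simp at hq
        | cons q0 qs0 =>
          rw [hr] at hq
          have hq0 : q = q0 := (by simpa using hq : q0 = q).symm
          subst hq0
          have hfq : f < q := (List.pairwise_cons.mp i3).1 q (by rw [hr]; exact List.mem_cons_self)
          by_cases hc1 : q = f + 1
          · -- previous run broke on a service change
            have hns := i7 q qs0 hr
            have hsvc : pvSvcB o q ≠ pvSvcB o f := fun hcon => hns ⟨hc1, hcon⟩
            have hqf : q - 1 = f := by omega
            have hsq : pvSvcB o f ≠ pvSvcB o q := fun hcon => hsvc hcon.symm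
            simp only [pvIsStartB, hqf, pvGetSvc o f hKf]
            simpa using hsq
          · -- gap: q-1 cannot be a key
            cases hKg : (PySem.Dict.mk o).get? (q - 1) with
            | none => simp [pvIsStartB, hKg]
            | some s =>
              exfalso
              have hKs : ((PySem.Dict.mk o).get? (q - 1)).isSome = true := by simp [hKg]
              have hin : q - 1 ∈ rest' := hmem' (q - 1) hKs (by omega)
              rw [hr] at hin
              rcases List.mem_cons.mp hin with h | h
              · omega
              · have hpr : List.Pairwise (· < ·) rest' := i3.tail
                rw [hr] at hpr
                have := (List.pairwise_cons.mp hpr).1 _ h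
                omega
      -- assemble the head group and recurse
      have hse : pvIsStartB o e = true := hhd e rfl
      have hlen' : rest'.length ≤ n := by
        have h1 := pvExtendB_len o e rest
        rw [← hrest'] at h1
        have : rest.length ≤ n := by simpa using Nat.le_of_succ_le_succ hlen
        omega
      have hK' : ∀ x ∈ rest', ((PySem.Dict.mk o).get? x).isSome = true :=
        fun x hx => hK x (List.mem_cons_of_mem _ (i9 x hx))
      have hcl' : ∀ y, ((PySem.Dict.mk o).get? y).isSome = true → (∃ x ∈ rest', x < y) → y ∈ rest' := by
        intro y hKy ⟨x, hx, hxy⟩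
        have hfx : f < x := (List.pairwise_cons.mp i3).1 x hx
        exact hmem' y hKy (by omega)
      have hrec := ih rest' hlen' i3.tail hK' hcl' hhd'
      rw [pvChunksB_cons]
      rw [← hf, ← hrest']
      rw [List.filter_cons_of_pos (by simp [hse])]
      rw [i5, List.filter_cons_of_pos (by simp [hef])]
      rw [i4]
      rw [List.zip_cons_cons, List.map_cons, hrec]
      rfl

-- ===== VERDICT (by name: the statement is the Claim_ definition above) =====
theorem group_open_ports_spec : Claim_equal_group_open_ports := by
  intro o _
  unfold Spec_group_open_ports group_open_ports group_open_ports_alt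
  rw [pvA_chunks]
  set ks := PySem.List.sorted (PySem.List.dedup (o.map Prod.fst)) (fun x => x) false with hks
  have hmemks : ∀ y, ((PySem.Dict.mk o).get? y).isSome = true → y ∈ ks := by
    intro y hy
    have : y ∈ (PySem.Dict.mk o).keys := by
      by_contra hnk
      have hnone : (PySem.Dict.mk o).get? y = none :=
        (PySem.Dict.get?_eq_none_iff_not_mem_keys _ _).mpr hnk
      rw [hnone] at hy; simp at hy
    rw [PySem.Dict.keys_mk] at this
    rw [hks, PySem.List.mem_sorted, PySem.List.mem_dedup]
    exact this
  apply pvChunks_zip o ks.length ks (le_refl _)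
  · rw [hks, PySem.List.dedup_eq_ofList]
    exact PySem.List.sorted_ofList_pairwise_lt _
  · intro x hx
    rw [hks, PySem.List.mem_sorted, PySem.List.mem_dedup] at hx
    rw [Option.isSome_iff_ne_none, Ne, PySem.Dict.get?_eq_none_iff_not_mem_keys, PySem.Dict.keys_mk]
    simp [hx]
  · exact fun y hy _ => hmemks y hy
  · intro q hq
    cases hkc : ks with
    | nil => rw [hkc] at hq; simp at hq
    | cons q0 t =>
      rw [hkc] at hq
      have hq0 : q = q0 := (by simpa using hq : q0 = q).symm
      subst hq0
      cases hKg : (PySem.Dict.mk o).get? (q - 1) with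
      | none => simp [pvIsStartB, hKg]
      | some s =>
        exfalso
        have hin : q - 1 ∈ ks := hmemks (q - 1) (by simp [hKg])
        have hsorted : PySem.List.sorted (PySem.List.dedup (o.map Prod.fst)) (fun x => x) false = q :: t := by
          rw [← hks]; exact hkc
        have hmin : ∀ y ∈ PySem.List.dedup (o.map Prod.fst), q ≤ y :=
          PySem.List.key_head_sorted_le _ _ hsorted
        have : q ≤ q - 1 := by
          apply hmin
          rw [hks, PySem.List.mem_sorted, PySem.List.mem_dedup] at hin
          rw [PySem.List.mem_dedup]
          exact hin
        omega
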